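-- pv_equiv track=rewrite | github.com/Zhurkin-Alex/LaunchPad | backtest.py | _filter_monthly
-- ===== SOURCE A (Python) =====
-- def _filter_monthly(history: list[dict]) -> list[dict]:
--     """Первый торговый день каждого месяца."""
--     seen: set[str] = set()
--     result: list[dict] = []
--     for h in history:
--         month = h["date"][:7]  # "YYYY-MM"
--         if month not in seen:
--             seen.add(month)
--             result.append(h)
--     return result
-- ===== SOURCE B (Python) =====
-- def _filter_monthly(history: list[dict]) -> list[dict]:
--     """Первый торговый день каждого месяца."""
--     if not history:
--         return []
--     first, rest = history[0], history[1:]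
--     month = first["date"][:7]
--     return [first] + _filter_monthly([h for h in rest if h["date"][:7] != month])
-- ===== Notes on version B (the rewrite author's own statement) =====
-- stated objective: alternative
-- what changed: Replaces the single pass with a seen-set and result accumulator by a head/rest recursion that keeps the head and deletes every later entry of the head's month before recursing, so no auxiliary set or membership test is kept at all.
import Mathlib
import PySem

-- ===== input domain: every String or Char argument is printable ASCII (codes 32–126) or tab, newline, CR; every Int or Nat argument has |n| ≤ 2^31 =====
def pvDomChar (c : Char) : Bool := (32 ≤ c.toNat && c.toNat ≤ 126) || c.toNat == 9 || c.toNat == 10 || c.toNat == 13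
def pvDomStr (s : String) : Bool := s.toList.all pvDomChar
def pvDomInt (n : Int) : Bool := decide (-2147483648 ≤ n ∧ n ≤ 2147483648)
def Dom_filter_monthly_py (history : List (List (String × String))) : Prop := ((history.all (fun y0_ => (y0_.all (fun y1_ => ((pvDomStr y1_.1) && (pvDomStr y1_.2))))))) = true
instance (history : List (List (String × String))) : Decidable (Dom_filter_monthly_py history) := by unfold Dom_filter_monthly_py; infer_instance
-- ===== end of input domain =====

-- B replaces A's seen-set + accumulator pass by a head/rest recursion that deletes later
-- entries of the head's month before recursing (alternative algorithm, same results).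


-- ===== PORT A =====
-- month = h["date"][:7]; a record h : List (String × String) is a Python dict, lookup = first match.
-- Pre_ guarantees the "date" key is present, so getD "" never supplies its default on admitted inputs.
def pvMonth (h : List (String × String)) : String :=
  PySem.Str.slice (((PySem.Dict.mk h).get? "date").getD "") none (some 7)

def filter_monthly_py (history : List (List (String × String))) : List (List (String × String)) :=
  (history.foldl
    (fun (st : PySem.Set String × List (List (String × String))) h =>
      let month := pvMonth h
      if PySem.Set.contains st.1 month then st
      else (PySem.Set.add st.1 month, st.2 ++ [h]))
    (PySem.Set.empty, [])).2

-- ===== PORT B =====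
def filter_monthly_py_alt : List (List (String × String)) → List (List (String × String))
  | [] => []
  | first :: rest =>
    let month := pvMonth first
    [first] ++ filter_monthly_py_alt (rest.filter (fun h => pvMonth h != month))
termination_by l => l.length
decreasing_by simpa using Nat.lt_succ_of_le (List.length_filter_le _ _)

-- ===== PRECONDITION & SPEC =====
-- Pre_ excludes exactly the inputs where some record lacks the "date" key: there the Python A
-- (and B alike) raises KeyError.
def Pre_filter_monthly_py (history : List (List (String × String))) : Prop :=
  ∀ h ∈ history, ((PySem.Dict.mk h).get? "date").isSome
instance (history : List (List (String × String))) : Decidable (Pre_filter_monthly_py history) := by unfold Pre_filter_monthly_py; infer_instance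
def pvWitness_filter_monthly_py : (List (List (String × String))) :=
  [[("date", "2024-01-02"), ("p", "10")], [("date", "2024-01-15")], [("date", "2024-02-01")]]

def Spec_filter_monthly_py (history : List (List (String × String))) (out : List (List (String × String))) : Prop := out = filter_monthly_py_alt history
instance (history : List (List (String × String))) (out : List (List (String × String))) : Decidable (Spec_filter_monthly_py history out) := by unfold Spec_filter_monthly_py; infer_instance

-- ===== CLAIM (what is proved, stated in full; the proofs are below) =====
def Claim_equal_filter_monthly_py : Prop := ∀ (history : List (List (String × String))), Dom_filter_monthly_py history → Pre_filter_monthly_py history → Spec_filter_monthly_py history (filter_monthly_py history)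

-- ===== LEMMAS AND PROOFS =====

-- Loop invariant: A's fold from state (s, acc) produces acc ++ B applied to the entries
-- whose month is not yet in s.
theorem pvLoop (l : List (List (String × String)))
    (s : PySem.Set String) (acc : List (List (String × String))) :
    (l.foldl
      (fun (st : PySem.Set String × List (List (String × String))) h =>
        let month := pvMonth h
        if PySem.Set.contains st.1 month then st
        else (PySem.Set.add st.1 month, st.2 ++ [h]))
      (s, acc)).2
    = acc ++ filter_monthly_py_alt (l.filter (fun h => !(PySem.Set.contains s (pvMonth h)))) := by
  induction l generalizing s acc with
  | nil => simp only [List.foldl_nil, List.filter_nil]; rw [filter_monthly_py_alt]; simp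
  | cons h t ih =>
    simp only [List.foldl_cons, List.filter_cons]
    by_cases hm : pvMonth h ∈ s
    · simpa [PySem.Set.contains, hm] using ih s acc
    · have hfil : t.filter (fun x => !(PySem.Set.contains (PySem.Set.add s (pvMonth h)) (pvMonth x)))
          = (t.filter (fun x => !(PySem.Set.contains s (pvMonth x)))).filter
              (fun x => pvMonth x != pvMonth h) := by
        rw [List.filter_filter]
        apply List.filter_congr
        intro x _
        by_cases hx : pvMonth x = pvMonth h
        · simp [PySem.Set.contains, PySem.Set.add, hm, hx]
        · simp [PySem.Set.contains, PySem.Set.add, hm, hx]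
      have hB : filter_monthly_py_alt
            (h :: t.filter (fun x => !(PySem.Set.contains s (pvMonth x))))
          = [h] ++ filter_monthly_py_alt
              ((t.filter (fun x => !(PySem.Set.contains s (pvMonth x)))).filter
                (fun x => pvMonth x != pvMonth h)) := by
        rw [filter_monthly_py_alt]
      have hc : PySem.Set.contains s (pvMonth h) = false := by
        simp [PySem.Set.contains, hm]
      have := ih (PySem.Set.add s (pvMonth h)) (acc ++ [h])
      rw [hfil] at this
      simp only [hc, Bool.not_false, Bool.false_eq_true, if_false, if_true]
      rw [hB]
      simpa using this

-- ===== VERDICT (by name: the statement is the Claim_ definition above) =====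
theorem filter_monthly_py_spec : Claim_equal_filter_monthly_py := by
  intro history _ _
  unfold Spec_filter_monthly_py filter_monthly_py
  simpa [PySem.Set.contains] using pvLoop history PySem.Set.empty []
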